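-- pv_equiv track=rewrite | github.com/josy0319/BOJ-SW-Expert-Academy | PriorityQueue/라면공장(!).py | solution
-- ===== SOURCE A (Python) =====
-- def solution(stock, dates, supplies, k):
--     res = 0
--     temp = []
--     cnt = 0
--     for i in range(k):
--         if stock >= k-i:
--             break
--         if i in dates:
--             temp.append(supplies[cnt])
--             cnt+=1
--         if stock == 0:
--             stock += supplies[supplies.index(max(temp))]
--             supplies[supplies.index(max(temp))] = -1
--             temp[temp.index(max(temp))] = -1
--             res += 1
--         stock -= 1
--     return res
-- ===== SOURCE B (Python) =====
-- # Event-driven greedy: jump from one out-of-stock day to the next, always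
-- # restocking with the largest shipment whose date has already passed.
-- # NOTE: unlike A, B does not mutate `supplies` in place.
-- def solution(stock, dates, supplies, k):
--     res = 0
--     avail = []
--     j = 0
--     n = len(dates)
--     day = stock                 # first day the factory runs out
--     while day < k:
--         while j < n and dates[j] <= day:
--             avail.append(supplies[j])
--             j += 1
--         m = max(avail)
--         avail.remove(m)
--         day += m
--         res += 1
--     return res
-- ===== Notes on version B (the rewrite author's own statement) =====
-- stated objective: alternative
-- what changed: A simulates every single day 0..k-1, re-scanning dates for membership and temp/supplies with max/index on each restock; B is event-driven: it jumps from one out-of-stock day to the next with a single advancing pointer over the date-ordered shipments, so there is no per-day loop over k; Pre_ restricts to the problem's input contract (nonnegative stock, strictly increasing in-range dates paired with positive supplies, enough supply to reach day k, or the trivial region k <= stock), outside which A raises or its value is an accident of its -1-sentinel bookkeeping.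
-- outside the precondition, e.g. on solution(-1, [0], [2], 2): A returns 0, B raises ValueError; on solution(-1, [-1], [5], 2): A returns 0, B returns 1
import Mathlib
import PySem

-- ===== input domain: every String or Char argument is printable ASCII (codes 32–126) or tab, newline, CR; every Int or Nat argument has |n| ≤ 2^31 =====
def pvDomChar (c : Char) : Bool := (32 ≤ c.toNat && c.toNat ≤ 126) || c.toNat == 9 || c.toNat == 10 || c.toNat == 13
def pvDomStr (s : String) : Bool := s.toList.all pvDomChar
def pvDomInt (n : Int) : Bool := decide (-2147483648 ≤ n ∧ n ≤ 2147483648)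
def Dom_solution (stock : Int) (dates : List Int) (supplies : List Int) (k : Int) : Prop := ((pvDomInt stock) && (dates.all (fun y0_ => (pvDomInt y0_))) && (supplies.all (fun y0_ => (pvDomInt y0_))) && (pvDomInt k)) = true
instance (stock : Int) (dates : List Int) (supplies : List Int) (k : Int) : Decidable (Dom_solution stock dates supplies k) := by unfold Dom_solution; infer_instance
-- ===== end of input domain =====

-- B replaces A's day-by-day simulation by an event-driven jump between out-of-stock days.
-- NOTE: A mutates `supplies` in place (writes -1 over consumed entries); B does not.
-- The equivalence proved here is about the RETURN value only.

-- ===== PORT A =====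
-- literal port of A's for-loop; each Python raise site returns the current res (those
-- inputs lie outside Pre_solution)
def solutionGo (dates : List Int) (k : Int) (is : List Int) (res : Int)
    (temp : List Int) (cnt : Int) (stock : Int) (supplies : List Int) : Int :=
  match is with
  | [] => res
  | i :: is' =>
    if k - i ≤ stock then res                                  -- if stock >= k-i: break
    else
      match (if dates.contains i then                          -- if i in dates:
               match PySem.List.pyGet? supplies cnt with       --   supplies[cnt]
               | none => none                                  --   (IndexError)
               | some v => some (temp ++ [v], cnt + 1)         --   temp.append(…); cnt += 1
             else some (temp, cnt)) with
      | none => res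
      | some (temp, cnt) =>
        if stock = 0 then                                      -- if stock == 0:
          match PySem.List.max? temp (fun y => y) with         --   max(temp)
          | none => res                                        --   (ValueError on empty temp)
          | some m =>
            match PySem.List.index? supplies m with            --   supplies.index(max(temp))
            | none => res                                      --   (ValueError)
            | some p =>
              let stock := stock + supplies.getD p 0           --   stock += supplies[…]
              let supplies := supplies.set p (-1)              --   supplies[…] = -1
              match PySem.List.index? temp m with              --   temp.index(max(temp))
              | none => res                                    --   (ValueError; unreachable)
              | some q =>
                solutionGo dates k is' (res + 1) (temp.set q (-1)) cnt (stock - 1) supplies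
        else
          solutionGo dates k is' res temp cnt (stock - 1) supplies

def solution (stock : Int) (dates : List Int) (supplies : List Int) (k : Int) : Int :=
  solutionGo dates k (PySem.List.pyRange 0 k 1) 0 [] 0 stock supplies

-- ===== PORT B =====
-- the inner while: move every shipment whose date has been reached into avail
-- (the j-pointer walk over dates/supplies is rendered as a walk down their zip)
def pushWhile (pending : List (Int × Int)) (avail : List Int) (day : Int) :
    List (Int × Int) × List Int :=
  match pending with
  | [] => ([], avail)
  | (d, s) :: rest =>
    if d ≤ day then pushWhile rest (avail ++ [s]) day
    else ((d, s) :: rest, avail)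

-- the outer while (day < k); `none => res` is Python's ValueError on max([]),
-- and the `0 < m` test only guards termination: with m ≤ 0 the Python loop can
-- never reach day k and ends in that same ValueError (both outside Pre_solution)
def solutionAltGo (k : Int) (pending : List (Int × Int)) (avail : List Int)
    (day res : Int) : Int :=
  if day < k then
    match pushWhile pending avail day with
    | (pending', avail') =>
      match PySem.List.max? avail' (fun y => y) with
      | none => res                                            -- m = max(avail): ValueError
      | some m =>
        match PySem.List.remove? avail' m with
        | none => res                                          -- (unreachable: m ∈ avail')
        | some avail'' =>
          if 0 < m then solutionAltGo k pending' avail'' (day + m) (res + 1)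
          else res
  else res
termination_by (k - day).toNat
decreasing_by omega

def solution_alt (stock : Int) (dates : List Int) (supplies : List Int) (k : Int) : Int :=
  solutionAltGo k (dates.zip supplies) [] stock 0

-- ===== PRECONDITION & SPEC =====
-- Pre_solution restricts to the problem's natural domain (the BOJ "ramen factory"
-- input contract): nonnegative starting stock, strictly increasing dates inside
-- [0, k) paired positionally with positive supply amounts, and enough supply to
-- survive every day before k -- plus the trivial region k <= stock, where A breaks
-- out on day 0 and both return 0 whatever the other arguments are.  Outside it A
-- either raises (ValueError/IndexError), or B raises, or A's value is an accident
-- of its -1-sentinel bookkeeping (e.g. negative stock never triggers A's exact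
-- == 0 test, so A returns 0 while B restocks); on most other excluded inputs A
-- and B in fact still agree.
def Pre_solution (stock : Int) (dates : List Int) (supplies : List Int) (k : Int) : Prop :=
  k ≤ stock ∨
  (0 ≤ stock ∧
  dates.Pairwise (· < ·) ∧
  (∀ d ∈ dates, 0 ≤ d ∧ d < k) ∧
  dates.length = supplies.length ∧
  (∀ s ∈ supplies, 1 ≤ s) ∧
  (∀ j ∈ PySem.List.pyRange 0 k 1,
    j < stock + (((dates.zip supplies).filter (fun p => p.1 ≤ j)).map (·.2)).sum))

instance (stock : Int) (dates : List Int) (supplies : List Int) (k : Int) :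
    Decidable (Pre_solution stock dates supplies k) := by
  unfold Pre_solution; infer_instance

def pvWitness_solution : Int × List Int × List Int × Int := (1, [0, 2], [3, 1], 4)

def Spec_solution (stock : Int) (dates : List Int) (supplies : List Int) (k : Int) (out : Int) : Prop := out = solution_alt stock dates supplies k
instance (stock : Int) (dates : List Int) (supplies : List Int) (k : Int) (out : Int) : Decidable (Spec_solution stock dates supplies k out) := by unfold Spec_solution; infer_instance

-- ===== CLAIM (what is proved, stated in full; the proofs are below) =====
def Claim_equal_solution : Prop := ∀ (stock : Int) (dates : List Int) (supplies : List Int) (k : Int), Dom_solution stock dates supplies k → Pre_solution stock dates supplies k → Spec_solution stock dates supplies k (solution stock dates supplies k)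

-- ===== LEMMAS AND PROOFS =====

theorem pushWhile_stop (pending : List (Int × Int)) (avail : List Int) (day : Int)
    (h : ∀ p ∈ pending, day < p.1) : pushWhile pending avail day = (pending, avail) := by
  match pending with
  | [] => rfl
  | (d, s) :: rest =>
    have hd : ¬ d ≤ day := not_le.mpr (h (d, s) (by simp))
    simp [pushWhile, hd]

theorem altGo_push (k dd s day res : Int) (pending : List (Int × Int)) (avail : List Int)
    (h : dd ≤ day) :
    solutionAltGo k ((dd, s) :: pending) avail day res
      = solutionAltGo k pending (avail ++ [s]) day res := by
  rw [solutionAltGo, solutionAltGo]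
  by_cases hk : day < k
  · simp only [if_pos hk, pushWhile, if_pos h]
  · simp [hk]

theorem max_filter_eq (temp : List Int)
    (h1 : ∀ t ∈ temp, t = -1 ∨ 1 ≤ t)
    (h2 : temp.filter (fun t => t != -1) ≠ []) :
    PySem.List.max? temp (fun y => y)
      = PySem.List.max? (temp.filter (fun t => t != -1)) (fun y => y) := by
  have htemp : temp ≠ [] := by
    intro h; subst h; simp at h2
  obtain ⟨m, hm⟩ : ∃ m, PySem.List.max? temp (fun y => y) = some m := by
    cases hmx : PySem.List.max? temp (fun y => y) with
    | none => exact absurd ((PySem.List.max?_eq_none_iff _ _).mp hmx) htemp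
    | some m => exact ⟨m, rfl⟩
  obtain ⟨m', hm'⟩ : ∃ m', PySem.List.max? (temp.filter (fun t => t != -1)) (fun y => y) = some m' := by
    cases hmx : PySem.List.max? (temp.filter (fun t => t != -1)) (fun y => y) with
    | none => exact absurd ((PySem.List.max?_eq_none_iff _ _).mp hmx) h2
    | some m' => exact ⟨m', rfl⟩
  have hmemf := PySem.List.max?_mem hm'
  have hmem'  : m' ∈ temp := (List.mem_filter.mp hmemf).1
  have hm'1 : 1 ≤ m' := by
    rcases h1 m' hmem' with h | h
    · exfalso; have := (List.mem_filter.mp hmemf).2; simp [h] at this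
    · exact h
  have hle1 : m' ≤ m := PySem.List.max?_isMax hm m' hmem'
  have hmf : m ∈ temp.filter (fun t => t != -1) :=
    List.mem_filter.mpr ⟨PySem.List.max?_mem hm, by simp; omega⟩
  have hle2 : m ≤ m' := PySem.List.max?_isMax hm' m hmf
  have : m = m' := by omega
  rw [hm, hm', this]

theorem filter_set_erase (temp : List Int) (m : Int) (q : Nat)
    (hq : PySem.List.index? temp m = some q) (hm : m ≠ -1) :
    (temp.set q (-1)).filter (fun t => t != -1)
      = (temp.filter (fun t => t != -1)).erase m := by
  obtain ⟨pre, suf, hsplit, hlen, hnot⟩ := (PySem.List.index?_eq_some_iff _ _ _).mp hq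
  subst hsplit
  subst hlen
  have hset : (pre ++ m :: suf).set pre.length (-1) = pre ++ (-1) :: suf := by
    rw [List.set_append]; simp
  rw [hset, List.filter_append, List.filter_append]
  have hmn : m ∉ pre.filter (fun t => t != -1) := fun h => hnot (List.mem_filter.mp h).1
  rw [List.erase_append_right _ hmn]
  simp [hm]

set_option maxHeartbeats 1600000 in
theorem main_lemma (k : Int) (datesAll : List Int) :
    ∀ n : ℕ, ∀ (i d res : Int) (temp done rest srest : List Int),
    (k - i).toNat = n →
    datesAll = done ++ rest →
    (∀ x ∈ done, x < i) →
    (∀ x ∈ rest, i ≤ x) →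
    rest.Pairwise (· < ·) →
    rest.length = srest.length →
    (∀ s ∈ srest, 1 ≤ s) →
    (∀ t ∈ temp, t = -1 ∨ 1 ≤ t) →
    temp.length = done.length →
    0 ≤ i → i ≤ d →
    (∀ j, i ≤ j → j < k →
      j < d + (temp.filter (fun t => t != -1)).sum
            + (((rest.zip srest).filter (fun p => p.1 ≤ j)).map (·.2)).sum) →
    solutionGo datesAll k (PySem.List.pyRange i k 1) res temp (done.length : Int) (d - i) (temp ++ srest)
      = solutionAltGo k (rest.zip srest) (temp.filter (fun t => t != -1)) d res := by
  intro n
  induction n with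
  | zero =>
    intro i d res temp done rest srest hn hsplit hdone hrest hpw hlen hsup htemp htlen hi0 hid hfeas
    have hki : k ≤ i := by omega
    rw [PySem.List.pyRange_one_eq_nil hki]
    rw [solutionAltGo]
    have : ¬ d < k := by omega
    simp [solutionGo, this]
  | succ n ih =>
    intro i d res temp done rest srest hn hsplit hdone hrest hpw hlen hsup htemp htlen hi0 hid hfeas
    have hik : i < k := by omega
    rw [PySem.List.pyRange_one_cons hik]
    by_cases hdk : d < k
    case neg =>
      -- break immediately: stock = d - i ≥ k - i; B: day ≥ k
      rw [solutionAltGo]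
      have h1 : k - i ≤ d - i := by omega
      have h2 : ¬ d < k := hdk
      simp [solutionGo, h1, h2]
    case pos =>
    have hbr : ¬ k - i ≤ d - i := by omega
    -- the common continuation, after the membership/append step has produced
    -- state (temp₁, done₁, rest₁, srest₁)
    have key : ∀ (temp₁ done₁ rest₁ srest₁ : List Int),
        datesAll = done₁ ++ rest₁ →
        (∀ x ∈ done₁, x < i + 1) →
        (∀ x ∈ rest₁, i + 1 ≤ x) →
        rest₁.Pairwise (· < ·) →
        rest₁.length = srest₁.length →
        (∀ s ∈ srest₁, 1 ≤ s) →
        (∀ t ∈ temp₁, t = -1 ∨ 1 ≤ t) →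
        temp₁.length = done₁.length →
        (∀ j, i ≤ j → j < k →
          j < d + (temp₁.filter (fun t => t != -1)).sum
                + (((rest₁.zip srest₁).filter (fun p => p.1 ≤ j)).map (·.2)).sum) →
        (if d - i = 0 then
           (match PySem.List.max? temp₁ (fun y => y) with
            | none => res
            | some m =>
              match PySem.List.index? (temp₁ ++ srest₁) m with
              | none => res
              | some p =>
                match PySem.List.index? temp₁ m with
                | none => res
                | some q =>
                  solutionGo datesAll k (PySem.List.pyRange (i+1) k 1) (res+1)
                    (temp₁.set q (-1)) ((done₁.length : Int))
                    (d - i + (temp₁ ++ srest₁).getD p 0 - 1)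
                    ((temp₁ ++ srest₁).set p (-1)))
         else
           solutionGo datesAll k (PySem.List.pyRange (i+1) k 1) res temp₁
             ((done₁.length : Int)) (d - i - 1) (temp₁ ++ srest₁))
        = solutionAltGo k (rest₁.zip srest₁) (temp₁.filter (fun t => t != -1)) d res := by
      intro temp₁ done₁ rest₁ srest₁ hsplit₁ hdone₁ hrest₁ hpw₁ hlen₁ hsup₁ htemp₁ htlen₁ hfeas₁
      by_cases hstock : d - i = 0
      · -- restock day: i = d
        have hdi : d = i := by omega
        rw [if_pos hstock]
        set avail := temp₁.filter (fun t => t != -1) with havail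
        -- pending supplies all have dates > i, so nothing is pushed and the
        -- feasibility bound shows avail is nonempty
        have hpend : ∀ p ∈ rest₁.zip srest₁, i < p.1 := by
          intro p hp
          have := (List.of_mem_zip hp).1
          have := hrest₁ p.1 this
          omega
        have hpendnil : (rest₁.zip srest₁).filter (fun p => p.1 ≤ i) = [] := by
          apply List.filter_eq_nil_iff.mpr
          intro p hp
          simpa using not_le.mpr (hpend p hp)
        have hfi := hfeas₁ i le_rfl hik
        rw [hpendnil] at hfi
        have hsumpos : 0 < avail.sum := by
          simp at hfi; omega
        have hne : avail ≠ [] := by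
          intro h; rw [h] at hsumpos; simp at hsumpos
        obtain ⟨m, hm⟩ : ∃ m, PySem.List.max? avail (fun y => y) = some m := by
          cases hmx : PySem.List.max? avail (fun y => y) with
          | none => exact absurd ((PySem.List.max?_eq_none_iff _ _).mp hmx) hne
          | some m => exact ⟨m, rfl⟩
        have hmavail : m ∈ avail := PySem.List.max?_mem hm
        have hmtemp : m ∈ temp₁ := (List.mem_filter.mp hmavail).1
        have hm1 : 1 ≤ m := by
          rcases htemp₁ m hmtemp with h | h
          · exfalso; have := (List.mem_filter.mp hmavail).2; simp [h] at this
          · exact h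
        have hmaxtemp : PySem.List.max? temp₁ (fun y => y) = some m := by
          rw [max_filter_eq temp₁ htemp₁ hne]; exact hm
        obtain ⟨q, hq⟩ : ∃ q, PySem.List.index? temp₁ m = some q := by
          cases hix : PySem.List.index? temp₁ m with
          | none => exact absurd hmtemp ((PySem.List.index?_eq_none_iff _ _).mp hix)
          | some q => exact ⟨q, rfl⟩
        have hqfull : PySem.List.index? (temp₁ ++ srest₁) m = some q := by
          rw [PySem.List.index?_append_of_mem _ hmtemp]; exact hq
        obtain ⟨hqlt, hqval, -⟩ := PySem.List.getElem_of_index?_eq_some hq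
        have hgetD : (temp₁ ++ srest₁).getD q 0 = m := by
          rw [List.getD_eq_getElem?_getD, List.getElem?_append_left hqlt]
          simp [List.getElem?_eq_getElem hqlt, hqval]
        have hsetfull : (temp₁ ++ srest₁).set q (-1) = temp₁.set q (-1) ++ srest₁ :=
          List.set_append_left _ _ hqlt
        simp only [hmaxtemp, hqfull, hq, hgetD, hsetfull]
        have hfilter₂ : (temp₁.set q (-1)).filter (fun t => t != -1) = avail.erase m :=
          filter_set_erase temp₁ m q hq (by omega)
        have hsum₂ : avail.sum = m + (avail.erase m).sum := List.sum_erase hmavail |>.symm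
        -- the A-side recursion equals, by the induction hypothesis, the B-state
        -- after this restock
        have harg : d - i + m - 1 = (i + m) - (i + 1) := by omega
        have hA := ih (i+1) (i+m) (res+1) (temp₁.set q (-1)) done₁ rest₁ srest₁
          (by omega) hsplit₁ hdone₁ hrest₁ hpw₁
          (by simpa using hlen₁) hsup₁
          (by intro t ht
              rcases List.mem_or_eq_of_mem_set ht with h | h
              · exact htemp₁ t h
              · exact Or.inl h)
          (by simpa using htlen₁) (by omega) (by omega)
          (by intro j hj hjk
              have := hfeas₁ j (by omega) hjk
              rw [hfilter₂]
              omega)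
        have hB : solutionAltGo k (rest₁.zip srest₁) avail d res
            = solutionAltGo k (rest₁.zip srest₁) (avail.erase m) (i + m) (res + 1) := by
          rw [solutionAltGo]
          rw [if_pos (show d < k by omega)]
          rw [show pushWhile (rest₁.zip srest₁) avail d = (rest₁.zip srest₁, avail) from
            pushWhile_stop _ _ _ (by intro p hp; have := hpend p hp; omega)]
          simp only [hm, PySem.List.remove?_eq_some_erase _ m hmavail,
            if_pos (show (0:Int) < m by omega), hdi]
        rw [harg, hA, hfilter₂, hB]
      · -- ordinary day: stock > 0, both sides just advance
        rw [if_neg hstock]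
        have hA := ih (i+1) d res temp₁ done₁ rest₁ srest₁
          (by omega) hsplit₁ hdone₁ hrest₁ hpw₁ hlen₁ hsup₁ htemp₁ htlen₁
          (by omega) (by omega)
          (by intro j hj hjk; exact hfeas₁ j (by omega) hjk)
        have harg : d - i - 1 = d - (i + 1) := by omega
        rw [harg, hA]
    -- now the membership/append step, by cases on whether date i is pending
    rcases hrs : rest with _ | ⟨r, rest'⟩
    · -- no pending dates at all: i is not in datesAll
      subst hrs
      have hsrest : srest = [] := List.length_eq_zero_iff.mp (by simpa using hlen.symm)
      subst hsrest
      have hnotin : i ∉ datesAll := by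
        rw [hsplit, List.append_nil]
        intro h
        exact absurd (hdone i h) (by omega)
      have hcont : datesAll.contains i = false := by simpa using hnotin
      simp only [solutionGo, if_neg hbr, hcont, Bool.false_eq_true, if_false]
      exact key temp done [] []
        (by simpa using hsplit)
        (by intro x hx; have := hdone x hx; omega)
        (by simp) (by simp) (by simp) (by simp) htemp htlen
        (by intro j hj hjk; exact hfeas j hj hjk)
    · rcases hss : srest with _ | ⟨s, srest'⟩
      · exfalso; rw [hrs, hss] at hlen; simp at hlen
      by_cases hri : i = r
      · -- date i is the next pending date: A appends supplies[cnt], B will push it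
        subst hri
        have hcont : datesAll.contains i = true := by
          have : i ∈ datesAll := by rw [hsplit, hrs]; simp
          simpa using this
        have hcnt : ((done.length : Int)) = ((temp.length : Int)) := by rw [htlen]
        have hget : PySem.List.pyGet? (temp ++ s :: srest') ((done.length : Int))
            = some s := by
          rw [hcnt]; exact PySem.List.pyGet?_append_length temp srest' s
        have hs1 : 1 ≤ s := hsup s (by rw [hss]; simp)
        have hrest' : ∀ x ∈ rest', i + 1 ≤ x := by
          intro x hx
          have := (List.pairwise_cons.mp (hrs ▸ hpw)).1 x hx
          omega
        have hkey := key (temp ++ [s]) (done ++ [i]) rest' srest'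
          (by rw [hsplit, hrs]; simp)
          (by intro x hx
              rcases List.mem_append.mp hx with h | h
              · have := hdone x h; omega
              · simp at h; omega)
          hrest'
          ((List.pairwise_cons.mp (hrs ▸ hpw)).2)
          (by have := hlen; rw [hrs, hss] at this; simpa using this)
          (by intro t ht; exact hsup t (by rw [hss]; simp [ht]))
          (by intro t ht
              rcases List.mem_append.mp ht with h | h
              · exact htemp t h
              · simp at h; right; omega)
          (by simp [htlen])
          (by intro j hj hjk
              have := hfeas j hj hjk
              rw [hrs, hss] at this
              have hij : (decide (i ≤ j)) = true := by simp; omega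
              simp only [List.zip_cons_cons, List.filter_cons, hij, if_true] at this
              rw [List.filter_append]
              have : j < d + ((temp.filter (fun t => t != -1)).sum
                  + ([s].filter (fun t => t != -1)).sum)
                  + (((rest'.zip srest').filter (fun p => p.1 ≤ j)).map (·.2)).sum := by
                simp only [List.filter_cons, List.map_cons, List.sum_cons] at this ⊢
                have hs : (s != -1) = true := by simp; omega
                simp [hs]
                omega
              simpa [List.sum_append] using this)
        simp only [solutionGo, if_neg hbr, hcont, if_true, hget]
        have hassoc : temp ++ s :: srest' = (temp ++ [s]) ++ srest' := by simp
        have hlen' : ((done.length : Int)) + 1 = (((done ++ [i]).length : Int)) := by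
          simp
        rw [hassoc, hlen']
        rw [hkey]
        -- B pushes (i, s) at day d (i ≤ d)
        have hpush := altGo_push k i s d res (rest'.zip srest')
          (temp.filter (fun t => t != -1)) hid
        have hfs : (temp ++ [s]).filter (fun t => t != -1)
            = temp.filter (fun t => t != -1) ++ [s] := by
          have hs : (s != -1) = true := by simp; omega
          simp [List.filter_append, hs]
        rw [hfs, ← hpush]
        simp [List.zip_cons_cons]
      · -- next pending date is later: i not in datesAll
        have hir : i < r := by
          have h1 := hrest r (by rw [hrs]; simp)
          omega
        have hnotin : i ∉ datesAll := by
          rw [hsplit]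
          intro h
          rcases List.mem_append.mp h with h | h
          · exact absurd (hdone i h) (by omega)
          · rw [hrs] at h
            rcases List.mem_cons.mp h with h | h
            · omega
            · have := (List.pairwise_cons.mp (hrs ▸ hpw)).1 i h
              omega
        have hcont : datesAll.contains i = false := by simpa using hnotin
        simp only [solutionGo, if_neg hbr, hcont, Bool.false_eq_true, if_false]
        rw [← hrs, ← hss]
        exact key temp done rest srest
          hsplit
          (by intro x hx; have := hdone x hx; omega)
          (by intro x hx
              rw [hrs] at hx
              rcases List.mem_cons.mp hx with h | h
              · omega
              · have := (List.pairwise_cons.mp (hrs ▸ hpw)).1 x h; omega)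
          hpw hlen hsup htemp htlen
          (by intro j hj hjk; exact hfeas j hj hjk)

-- ===== VERDICT (by name: the statement is the Claim_ definition above) =====
theorem solution_spec : Claim_equal_solution := by
  intro stock dates supplies k _hDom hPre
  rcases hPre with htriv | hPre
  · -- stock already covers the whole horizon: A breaks at i = 0, B never loops
    unfold Spec_solution solution solution_alt
    rw [solutionAltGo, if_neg (by omega : ¬ stock < k)]
    by_cases hk : 0 < k
    · rw [PySem.List.pyRange_one_cons hk]
      simp only [solutionGo]
      rw [if_pos (by omega : k - 0 ≤ stock)]
    · rw [PySem.List.pyRange_one_eq_nil (by omega)]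
      rfl
  obtain ⟨h0, hpw, hnn, hlen, hsup, hfeas⟩ := hPre
  unfold Spec_solution solution solution_alt
  have := main_lemma k dates (k - 0).toNat 0 stock 0 [] [] dates supplies rfl rfl
    (by simp) (fun x hx => (hnn x hx).1)
    hpw hlen hsup (by simp) rfl le_rfl h0
    (by intro j hj0 hjk
        have := hfeas j (by rw [PySem.List.mem_pyRange_one]; exact ⟨hj0, hjk⟩)
        simpa using this)
  simpa using this
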